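-- pv_equiv track=rewrite | github.com/bermuda-ut/under-education-codes | University_Project_2/header.py | only_mins
-- ===== SOURCE A (Python) =====
-- def only_mins(lst):
--     """
--     only_mins returns lists in lst with minium length.
--
--     Assumptions: lst is not empty and contains lists.
--     """
--
--     minlst = [lst[0]]
--
--     for item in lst[1:]:
--         if len(item) < len(minlst[0]):
--             minlst = [item]
--         elif len(item) == len(minlst[0]):
--             minlst.append(item)
--             # Add to list if equal length
--
--     return minlst
-- ===== SOURCE B (Python) =====
-- def only_mins(lst):
--     """only_mins returns lists in lst with minimum length (two passes: min, then filter)."""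
--     m = min(len(x) for x in lst)
--     return [x for x in lst if len(x) == m]
-- ===== Notes on version B (the rewrite author's own statement) =====
-- stated objective: simpler
-- what changed: Replaces the running-accumulator scan (conditionally resetting/appending to minlst) with two independent passes: compute the minimum length with min(), then filter by it.
-- outside the precondition, e.g. on only_mins([]): A raises IndexError, B raises ValueError
import Mathlib
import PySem

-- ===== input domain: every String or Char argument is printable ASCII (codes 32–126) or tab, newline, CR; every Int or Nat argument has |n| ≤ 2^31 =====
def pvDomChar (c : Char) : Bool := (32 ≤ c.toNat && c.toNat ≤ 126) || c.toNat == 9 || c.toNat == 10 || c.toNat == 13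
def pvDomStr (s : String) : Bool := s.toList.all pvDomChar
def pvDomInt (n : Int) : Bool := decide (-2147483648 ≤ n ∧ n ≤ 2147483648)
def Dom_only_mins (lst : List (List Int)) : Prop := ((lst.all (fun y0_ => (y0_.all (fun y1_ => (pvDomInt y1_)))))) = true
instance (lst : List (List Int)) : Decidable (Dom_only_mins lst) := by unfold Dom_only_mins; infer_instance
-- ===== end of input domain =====

-- B replaces A's single running-accumulator scan by two passes (min length, then filter); simpler, same values on nonempty input.


-- ===== PORT A =====
-- loop body of A; minlst[0] is exact as (minlst.headD []) because minlst is nonempty throughout the loop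
def only_mins_step (minlst : List (List Int)) (item : List Int) : List (List Int) :=
  if item.length < (minlst.headD []).length then [item]
  else if item.length = (minlst.headD []).length then minlst ++ [item]
  else minlst

def only_mins (lst : List (List Int)) : List (List Int) :=
  match lst with
  | [] => []                      -- unreachable under Pre_ (Python raises IndexError on lst[0])
  | h :: t => t.foldl only_mins_step [h]

-- ===== PORT B =====
def only_mins_alt (lst : List (List Int)) : List (List Int) :=
  match lst with
  | [] => []                      -- unreachable under Pre_ (Python min() raises ValueError)
  | h :: t =>
    let m := (t.map List.length).foldl min h.length   -- min(len(x) for x in lst)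
    lst.filter (fun x => x.length == m)

-- ===== PRECONDITION & SPEC =====
-- Pre_ excludes only the empty list, on which both Pythons raise (A IndexError, B ValueError).
def Pre_only_mins (lst : List (List Int)) : Prop := lst ≠ []
instance (lst : List (List Int)) : Decidable (Pre_only_mins lst) := by unfold Pre_only_mins; infer_instance
def pvWitness_only_mins : List (List Int) := [[1, 2], [3]]
def Spec_only_mins (lst : List (List Int)) (out : List (List Int)) : Prop := out = only_mins_alt lst
instance (lst : List (List Int)) (out : List (List Int)) : Decidable (Spec_only_mins lst out) := by unfold Spec_only_mins; infer_instance

-- ===== CLAIM (what is proved, stated in full; the proofs are below) =====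
def Claim_equal_only_mins : Prop := ∀ (lst : List (List Int)), Dom_only_mins lst → Pre_only_mins lst → Spec_only_mins lst (only_mins lst)

-- ===== LEMMAS AND PROOFS =====

theorem foldl_min_le (l : List Nat) (m : Nat) : l.foldl min m ≤ m := by
  induction l generalizing m with
  | nil => simp
  | cons a l ih => exact le_trans (ih (min m a)) (min_le_left _ _)

-- loop invariant: for nonempty acc, the loop returns acc (iff the overall min equals acc's head length)
-- followed by the items of t whose length equals the overall min
theorem only_mins_loop (t : List (List Int)) (acc : List (List Int)) (hacc : acc ≠ []) :
    t.foldl only_mins_step acc =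
      (let M := (t.map List.length).foldl min (acc.headD []).length
       (if M = (acc.headD []).length then acc else []) ++ t.filter (fun x => x.length == M)) := by
  induction t generalizing acc with
  | nil => simp
  | cons item rest ih =>
    simp only [List.foldl_cons, List.map_cons]
    set m := (acc.headD []).length with hm
    by_cases h1 : item.length < m
    · have hstep : only_mins_step acc item = [item] := by
        unfold only_mins_step; rw [← hm, if_pos h1]
      rw [hstep, ih [item] (by simp)]
      simp only [List.headD_cons]
      have hmin : min m item.length = item.length := by omega
      simp only [hmin]
      set M := (rest.map List.length).foldl min item.length with hMdef
      have hle : M ≤ item.length := foldl_min_le _ _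
      rw [if_neg (by omega : ¬ M = m)]
      simp only [List.filter_cons, List.nil_append]
      by_cases h2 : item.length = M
      · have hb : (item.length == M) = true := by simp [h2]
        rw [hb, if_pos h2.symm]
        simp
      · have hb : (item.length == M) = false := by simp [h2]
        rw [hb, if_neg (fun he => h2 he.symm)]
        simp
    · by_cases h2 : item.length = m
      · have hstep : only_mins_step acc item = acc ++ [item] := by
          unfold only_mins_step; rw [← hm, if_neg h1, if_pos h2]
        rw [hstep, ih _ (by simp)]
        have hhead : ((acc ++ [item]).headD []) = acc.headD [] := by
          cases acc with
          | nil => exact absurd rfl hacc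
          | cons a l => simp
        have hmin : min m item.length = m := by omega
        rw [hhead, ← hm]
        simp only [hmin]
        set M := (rest.map List.length).foldl min m with hMdef
        have hMle : M ≤ m := foldl_min_le _ _
        simp only [List.filter_cons]
        by_cases h3 : M = m
        · have hb : (item.length == M) = true := by simp [h2, h3]
          rw [hb, if_pos h3, if_pos h3]
          simp [List.append_assoc]
        · have hb : (item.length == M) = false := by simp; omega
          rw [hb, if_neg h3, if_neg h3]
          simp
      · have hstep : only_mins_step acc item = acc := by
          unfold only_mins_step; rw [← hm, if_neg h1, if_neg h2]
        rw [hstep, ih acc hacc]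
        rw [← hm]
        have hmin : min m item.length = m := by omega
        simp only [hmin]
        set M := (rest.map List.length).foldl min m with hMdef
        have hMle : M ≤ m := foldl_min_le _ _
        have hb : (item.length == M) = false := by simp; omega
        simp only [List.filter_cons, hb, Bool.false_eq_true, if_false]

-- ===== VERDICT (by name: the statement is the Claim_ definition above) =====
theorem only_mins_spec : Claim_equal_only_mins := by
  intro lst _ hpre
  unfold Spec_only_mins
  cases lst with
  | nil => exact absurd rfl hpre
  | cons h t =>
    have ha : only_mins (h :: t) = t.foldl only_mins_step [h] := rfl
    have hb : only_mins_alt (h :: t) =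
        (h :: t).filter (fun x => x.length == (t.map List.length).foldl min h.length) := rfl
    rw [ha, hb, only_mins_loop t [h] (by simp)]
    simp only [List.headD_cons]
    set M := (t.map List.length).foldl min h.length with hMdef
    simp only [List.filter_cons]
    by_cases h3 : M = h.length
    · have hh : (h.length == M) = true := by simp [h3]
      rw [hh, if_pos h3]
      simp
    · have hh : (h.length == M) = false := by simp; omega
      rw [hh, if_neg h3]
      simp
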